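-- pv_equiv track=rewrite | github.com/SeniorDerpyDev/AdventOfCode | 2019/python/day22.py | compose_n_times
-- ===== SOURCE A (Python) =====
-- def compose_n_times(n, a, b, m):
--     ra, rb = 1, 0
--     while n != 0:
--         if n & 1 == 1:
--             ra, rb = (ra * a) % m, (ra * b + rb) % m
--         n = n >> 1
--         a, b = (a * a) % m, (a * b + b) % m
--     return ra, rb
-- ===== SOURCE B (Python) =====
-- def _compose(p, q, m):
--     return ((p[0] * q[0]) % m, (p[0] * q[1] + p[1]) % m)
--
--
-- def compose_n_times(n, a, b, m):
--     if n == 0: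
--         return (1, 0)
--     h = compose_n_times(n >> 1, a, b, m)
--     full = _compose(h, h, m)
--     if n & 1 == 1:
--         return _compose(full, (a, b), m)
--     return full
-- ===== Notes on version B (the rewrite author's own statement) =====
-- stated objective: alternative
-- what changed: Replaced the iterative bit-by-bit loop mutating (ra,rb,a,b) with a recursive divide-and-conquer on n//2 built on a single affine-composition helper.
import Mathlib
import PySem

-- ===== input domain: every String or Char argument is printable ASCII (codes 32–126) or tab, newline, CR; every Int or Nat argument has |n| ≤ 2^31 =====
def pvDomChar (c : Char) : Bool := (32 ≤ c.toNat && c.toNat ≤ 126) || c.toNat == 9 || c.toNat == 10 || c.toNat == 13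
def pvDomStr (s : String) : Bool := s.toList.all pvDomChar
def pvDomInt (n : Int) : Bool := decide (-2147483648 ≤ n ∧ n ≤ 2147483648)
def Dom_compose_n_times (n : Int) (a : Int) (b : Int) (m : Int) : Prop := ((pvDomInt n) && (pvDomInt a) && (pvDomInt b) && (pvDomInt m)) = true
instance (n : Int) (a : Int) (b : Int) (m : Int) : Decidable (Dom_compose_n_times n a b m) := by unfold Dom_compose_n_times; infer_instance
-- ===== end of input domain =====

-- B replaces A's iterative bit loop by a recursive divide-and-conquer on n//2 (alternative decomposition, same O(log n) cost).

-- ===== PORT A =====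
-- while-loop of A as fuel recursion; fuel n.toNat+1 suffices since n at least halves each step (exact for 0 ≤ n, where the loop terminates)
def goA (fuel : Nat) (n ra rb a b m : Int) : Int × Int :=
  match fuel with
  | 0 => (ra, rb)
  | f + 1 =>
    if n = 0 then (ra, rb)
    else
      let (ra', rb') :=
        if PySem.Int.band n 1 = 1 then (PySem.Int.mod (ra * a) m, PySem.Int.mod (ra * b + rb) m)
        else (ra, rb)
      goA f (n >>> (1 : Nat)) ra' rb' (PySem.Int.mod (a * a) m) (PySem.Int.mod (a * b + b) m) m

def compose_n_times (n : Int) (a : Int) (b : Int) (m : Int) : Int × Int :=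
  goA (n.toNat + 1) n 1 0 a b m

-- ===== PORT B =====
-- _compose((p0,p1),(q0,q1), m) of Source B
def composeB (p q : Int × Int) (m : Int) : Int × Int :=
  (PySem.Int.mod (p.1 * q.1) m, PySem.Int.mod (p.1 * q.2 + p.2) m)

-- recursive divide-and-conquer of Source B as fuel recursion (fuel n.toNat+1 suffices for 0 ≤ n)
def goB (fuel : Nat) (n a b m : Int) : Int × Int :=
  match fuel with
  | 0 => (1, 0)
  | f + 1 =>
    if n = 0 then (1, 0)
    else
      let h := goB f (n >>> (1 : Nat)) a b m
      let full := composeB h h m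
      if PySem.Int.band n 1 = 1 then composeB full (a, b) m else full

def compose_n_times_alt (n : Int) (a : Int) (b : Int) (m : Int) : Int × Int :=
  goB (n.toNat + 1) n a b m

-- ===== PRECONDITION & SPEC =====
-- Pre_ excludes exactly where A does not return: n < 0 (the loop/recursion never terminates) and m = 0 with n ≠ 0 (ZeroDivisionError).
def Pre_compose_n_times (n : Int) (a : Int) (b : Int) (m : Int) : Prop := 0 ≤ n ∧ (n = 0 ∨ m ≠ 0)
instance (n : Int) (a : Int) (b : Int) (m : Int) : Decidable (Pre_compose_n_times n a b m) := by unfold Pre_compose_n_times; infer_instance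
def pvWitness_compose_n_times : Int × Int × Int × Int := (5, 2, 3, 7)

def Spec_compose_n_times (n : Int) (a : Int) (b : Int) (m : Int) (out : Int × Int) : Prop := out = compose_n_times_alt n a b m
instance (n : Int) (a : Int) (b : Int) (m : Int) (out : Int × Int) : Decidable (Spec_compose_n_times n a b m out) := by unfold Spec_compose_n_times; infer_instance

-- ===== CLAIM (what is proved, stated in full; the proofs are below) =====
def Claim_equal_compose_n_times : Prop := ∀ (n : Int) (a : Int) (b : Int) (m : Int), Dom_compose_n_times n a b m → Pre_compose_n_times n a b m → Spec_compose_n_times n a b m (compose_n_times n a b m)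

-- ===== LEMMAS AND PROOFS =====

-- plain (un-reduced) affine composition and its n-th power
def acomp (p q : Int × Int) : Int × Int := (p.1 * q.1, p.1 * q.2 + p.2)
def apow : Nat → Int × Int → Int × Int
  | 0, _ => (1, 0)
  | k + 1, f => acomp f (apow k f)

def modPair (m : Int) (p : Int × Int) : Int × Int := (PySem.Int.mod p.1 m, PySem.Int.mod p.2 m)

-- componentwise congruence mod m
def pvCong (m : Int) (p q : Int × Int) : Prop := Int.ModEq m p.1 q.1 ∧ Int.ModEq m p.2 q.2

lemma pymod_modEq (m x : Int) : Int.ModEq m (PySem.Int.mod x m) x := by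
  have h := PySem.Int.floordiv_mul_add_mod x m
  have hx : PySem.Int.mod x m = x - PySem.Int.floordiv x m * m := by omega
  rw [hx]
  exact Int.modEq_iff_dvd.mpr ⟨PySem.Int.floordiv x m, by ring⟩

lemma pymod_congr {m x y : Int} (hm : m ≠ 0) (h : Int.ModEq m x y) :
    PySem.Int.mod x m = PySem.Int.mod y m := by
  rcases lt_or_gt_of_ne hm with hneg | hpos
  · have bx := PySem.Int.mod_neg_bounds x hneg
    have by' := PySem.Int.mod_neg_bounds y hneg
    have hcong : Int.ModEq m (PySem.Int.mod x m) (PySem.Int.mod y m) :=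
      ((pymod_modEq m x).trans h).trans (pymod_modEq m y).symm
    have hdvd : -m ∣ PySem.Int.mod y m - PySem.Int.mod x m :=
      (Int.neg_dvd).mpr (Int.ModEq.dvd hcong)
    have habs : |PySem.Int.mod y m - PySem.Int.mod x m| < -m := by
      rw [abs_lt]; omega
    have := Int.eq_zero_of_abs_lt_dvd hdvd habs
    omega
  · simp only [PySem.Int.mod_eq_emod_of_pos hpos]
    exact h

lemma pvCong_refl (m : Int) (p : Int × Int) : pvCong m p p := ⟨Int.ModEq.refl _, Int.ModEq.refl _⟩

lemma pvCong_trans {m : Int} {p q r : Int × Int} (h1 : pvCong m p q) (h2 : pvCong m q r) :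
    pvCong m p r := ⟨h1.1.trans h2.1, h1.2.trans h2.2⟩

lemma pvCong_modPair (m : Int) (p : Int × Int) : pvCong m (modPair m p) p :=
  ⟨pymod_modEq m p.1, pymod_modEq m p.2⟩

lemma modPair_congr {m : Int} (hm : m ≠ 0) {p q : Int × Int} (h : pvCong m p q) :
    modPair m p = modPair m q := by
  unfold modPair
  rw [pymod_congr hm h.1, pymod_congr hm h.2]

lemma acomp_cong {m : Int} {p p' q q' : Int × Int} (h1 : pvCong m p p') (h2 : pvCong m q q') :
    pvCong m (acomp p q) (acomp p' q') :=
  ⟨h1.1.mul h2.1, (h1.1.mul h2.2).add h1.2⟩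

lemma apow_cong {m : Int} (k : Nat) {f f' : Int × Int} (h : pvCong m f f') :
    pvCong m (apow k f) (apow k f') := by
  induction k with
  | zero => exact pvCong_refl m _
  | succ k ih => exact acomp_cong h ih

lemma acomp_assoc (p q r : Int × Int) : acomp (acomp p q) r = acomp p (acomp q r) := by
  unfold acomp
  simp only [Prod.mk.injEq]
  constructor <;> ring

lemma acomp_one (p : Int × Int) : acomp (1, 0) p = p := by
  unfold acomp; simp

lemma apow_one (f : Int × Int) : apow 1 f = f := by
  simp [apow, acomp]

lemma apow_succ_left (k : Nat) (f : Int × Int) : apow (k + 1) f = acomp f (apow k f) := rfl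

lemma apow_succ_right (k : Nat) (f : Int × Int) : apow (k + 1) f = acomp (apow k f) f := by
  induction k with
  | zero => simp [apow, acomp]
  | succ k ih =>
    calc apow (k + 2) f = acomp f (apow (k + 1) f) := rfl
      _ = acomp f (acomp (apow k f) f) := by rw [ih]
      _ = acomp (acomp f (apow k f)) f := (acomp_assoc _ _ _).symm
      _ = acomp (apow (k + 1) f) f := rfl

lemma apow_add (i j : Nat) (f : Int × Int) : apow (i + j) f = acomp (apow i f) (apow j f) := by
  induction j with
  | zero => simp [apow, acomp]
  | succ j ih =>
    calc apow (i + (j + 1)) f = apow ((i + j) + 1) f := by ring_nf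
      _ = acomp (apow (i + j) f) f := apow_succ_right _ _
      _ = acomp (acomp (apow i f) (apow j f)) f := by rw [ih]
      _ = acomp (apow i f) (acomp (apow j f) f) := acomp_assoc _ _ _
      _ = acomp (apow i f) (apow (j + 1) f) := by rw [apow_succ_right]

lemma apow_sq (k : Nat) (f : Int × Int) : apow k (acomp f f) = apow (2 * k) f := by
  induction k with
  | zero => rfl
  | succ k ih =>
    calc apow (k + 1) (acomp f f) = acomp (acomp f f) (apow k (acomp f f)) := rfl
      _ = acomp (acomp f f) (apow (2 * k) f) := by rw [ih]
      _ = acomp f (acomp f (apow (2 * k) f)) := acomp_assoc _ _ _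
      _ = apow (2 * k + 1 + 1) f := rfl
      _ = apow (2 * (k + 1)) f := by ring_nf

lemma apow_double (k : Nat) (f : Int × Int) :
    acomp (apow k f) (apow k f) = apow (2 * k) f := by
  rw [← apow_add]
  congr 1
  omega

lemma apow_odd_eq (P f : Int × Int) (k : Nat) :
    acomp (acomp P f) (apow k (acomp f f)) = acomp P (apow (2 * k + 1) f) := by
  rw [apow_sq, acomp_assoc, apow_succ_left]

lemma apow_even_eq (P f : Int × Int) (k : Nat) :
    acomp P (apow k (acomp f f)) = acomp P (apow (2 * k) f) := by
  rw [apow_sq]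

lemma shiftRight_one_of_nonneg {n : Int} (h : 0 ≤ n) :
    n >>> (1 : Nat) = ((n.toNat / 2 : Nat) : Int) := by
  obtain ⟨k, rfl⟩ := Int.eq_ofNat_of_zero_le h
  simp [Int.shiftRight_eq_div_pow]

lemma band_one_of_nonneg {n : Int} (h : 0 ≤ n) :
    PySem.Int.band n 1 = ((n.toNat % 2 : Nat) : Int) := by
  rw [PySem.Int.band_of_nonneg h (by norm_num)]
  norm_num [Nat.and_one_is_mod]

lemma composeB_eq (p q : Int × Int) (m : Int) : composeB p q m = modPair m (acomp p q) := rfl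

lemma goA_spec (f : Nat) : ∀ (n ra rb a b m : Int), m ≠ 0 → 0 ≤ n → n.toNat < f →
    goA f n ra rb a b m =
      if n = 0 then (ra, rb) else modPair m (acomp (ra, rb) (apow n.toNat (a, b))) := by
  induction f with
  | zero => intro n ra rb a b m _ _ h; omega
  | succ f ih =>
    intro n ra rb a b m hm hn hf
    by_cases h0 : n = 0
    · simp [goA, h0]
    · have hn1 : 1 ≤ n := by omega
      have hshift := shiftRight_one_of_nonneg hn
      have hband := band_one_of_nonneg hn
      have hn'nn : (0 : Int) ≤ n >>> (1 : Nat) := by rw [hshift]; positivity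
      have hn'toNat : (n >>> (1 : Nat)).toNat = n.toNat / 2 := by
        rw [hshift, Int.toNat_natCast]
      rw [goA]
      simp only [h0, if_false]
      rw [ih _ _ _ _ _ _ hm hn'nn (by omega)]
      have c2 : pvCong m (PySem.Int.mod (a * a) m, PySem.Int.mod (a * b + b) m)
          (acomp (a, b) (a, b)) := pvCong_modPair m (acomp (a, b) (a, b))
      by_cases hodd : n.toNat % 2 = 1
      · -- low bit set
        have hb : PySem.Int.band n 1 = 1 := by rw [hband, hodd]; rfl
        simp only [hb, if_pos]
        have c1 : pvCong m (PySem.Int.mod (ra * a) m, PySem.Int.mod (ra * b + rb) m)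
            (acomp (ra, rb) (a, b)) := pvCong_modPair m (acomp (ra, rb) (a, b))
        by_cases hz : n >>> (1 : Nat) = 0
        · -- n = 1 : the recursive call returns immediately
          have h1 : n.toNat = 1 := by omega
          simp only [if_pos hz]
          rw [h1, apow_one]
          rfl
        · simp only [if_neg hz]
          have hk : n.toNat = 2 * (n >>> (1 : Nat)).toNat + 1 := by omega
          rw [hk, ← apow_odd_eq]
          exact modPair_congr hm (acomp_cong c1 (apow_cong _ c2))
      · -- low bit clear
        have hev : n.toNat % 2 = 0 := by omega
        have hb : PySem.Int.band n 1 ≠ 1 := by rw [hband, hev]; decide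
        have hz : ¬ n >>> (1 : Nat) = 0 := by omega
        simp only [if_neg hb, if_neg hz]
        have hk : n.toNat = 2 * (n >>> (1 : Nat)).toNat := by omega
        rw [hk, ← apow_even_eq]
        exact modPair_congr hm (acomp_cong (pvCong_refl m (ra, rb)) (apow_cong _ c2))

lemma goB_spec (f : Nat) : ∀ (n a b m : Int), m ≠ 0 → 0 ≤ n → n.toNat < f →
    goB f n a b m = if n = 0 then (1, 0) else modPair m (apow n.toNat (a, b)) := by
  induction f with
  | zero => intro n a b m _ _ h; omega
  | succ f ih =>
    intro n a b m hm hn hf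
    by_cases h0 : n = 0
    · simp [goB, h0]
    · have hn1 : 1 ≤ n := by omega
      have hshift := shiftRight_one_of_nonneg hn
      have hband := band_one_of_nonneg hn
      have hn'nn : (0 : Int) ≤ n >>> (1 : Nat) := by rw [hshift]; positivity
      have hn'toNat : (n >>> (1 : Nat)).toNat = n.toNat / 2 := by
        rw [hshift, Int.toNat_natCast]
      rw [goB]
      simp only [h0, if_false]
      rw [ih _ _ _ _ hm hn'nn (by omega)]
      -- the recursive result is congruent to apow ((n >>> 1).toNat) in either branch
      have ch : pvCong m (if n >>> (1 : Nat) = 0 then ((1 : Int), (0 : Int))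
          else modPair m (apow (n >>> (1 : Nat)).toNat (a, b)))
          (apow (n >>> (1 : Nat)).toNat (a, b)) := by
        by_cases hz : n >>> (1 : Nat) = 0
        · have h1 : (n >>> (1 : Nat)).toNat = 0 := by omega
          rw [if_pos hz, h1]
          exact pvCong_refl m _
        · rw [if_neg hz]
          exact pvCong_modPair m _
      have cfull : pvCong m (composeB
          (if n >>> (1 : Nat) = 0 then ((1 : Int), (0 : Int))
            else modPair m (apow (n >>> (1 : Nat)).toNat (a, b)))
          (if n >>> (1 : Nat) = 0 then ((1 : Int), (0 : Int))
            else modPair m (apow (n >>> (1 : Nat)).toNat (a, b))) m)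
          (apow (2 * (n >>> (1 : Nat)).toNat) (a, b)) := by
        rw [composeB_eq, ← apow_double]
        exact pvCong_trans (pvCong_modPair m _) (acomp_cong ch ch)
      by_cases hodd : n.toNat % 2 = 1
      · have hb : PySem.Int.band n 1 = 1 := by rw [hband, hodd]; rfl
        simp only [hb, if_pos]
        have hk : n.toNat = 2 * (n >>> (1 : Nat)).toNat + 1 := by omega
        rw [composeB_eq, hk, apow_succ_right]
        exact modPair_congr hm (acomp_cong cfull (pvCong_refl m (a, b)))
      · have hev : n.toNat % 2 = 0 := by omega
        have hb : PySem.Int.band n 1 ≠ 1 := by rw [hband, hev]; decide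
        simp only [if_neg hb]
        have hk : n.toNat = 2 * (n >>> (1 : Nat)).toNat := by omega
        rw [composeB_eq, hk]
        have hcong : pvCong m (acomp
            (if n >>> (1 : Nat) = 0 then ((1 : Int), (0 : Int))
              else modPair m (apow (n >>> (1 : Nat)).toNat (a, b)))
            (if n >>> (1 : Nat) = 0 then ((1 : Int), (0 : Int))
              else modPair m (apow (n >>> (1 : Nat)).toNat (a, b))))
            (apow (2 * (n >>> (1 : Nat)).toNat) (a, b)) := by
          rw [← apow_double]
          exact acomp_cong ch ch
        exact modPair_congr hm hcong

-- ===== VERDICT =====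
theorem compose_n_times_spec : Claim_equal_compose_n_times := by
  intro n a b m _ hpre
  obtain ⟨hn, hcase⟩ := hpre
  unfold Spec_compose_n_times compose_n_times compose_n_times_alt
  by_cases h0 : n = 0
  · subst h0
    simp [goA, goB]
  · have hm : m ≠ 0 := by tauto
    rw [goA_spec _ _ _ _ _ _ _ hm hn (by omega), goB_spec _ _ _ _ _ hm hn (by omega)]
    rw [if_neg h0, if_neg h0, acomp_one]
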